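-- pv_equiv track=rewrite | github.com/JungRyung/Python | Exercise/dust_cleaning.py | solution
-- ===== SOURCE A (Python) =====
-- def solution(area):
--     answer = 0
--     height = len(area)
--     width = len(area[0])
--
--     for i in range(height-1):   # 바닥은 검색하지 않는다
--         for j in range(width):
--             # 해당 칸에 먼지가 있는 경우
--             if area[i][j] == '$':
--                 area[i] = area[i][:j] + '.' + area[i][j+1:]
--                 answer += 1
--                 # 바로 아래에 바닥이나 선반이 있는 경우
--                 # 바로 아래에 바닥이나 선반이 없는 경우
--                 if area[i+1][j] != '#':
--                     for k in range(i,height-1):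
--                         if area[k+1][j] == '#':
--                             area[k] = area[k][:j] + '$' + area[k][j+1:]
--                             break
--                 # area_print(area)
--     return answer
-- ===== SOURCE B (Python) =====
-- def solution(area):
--     height = len(area)
--     width = len(area[0])
--     grid = [list(row) for row in area]
--     # rev[-1] is the land row below the one being built; land[i][j] is the row where
--     # dust starting at row i in column j comes to rest (None: it falls out of the grid).
--     rev = [[None] * width]
--     for i in range(height - 2, -1, -1):
--         rev.append([i if grid[i + 1][j] == '#' else rev[-1][j] for j in range(width)])
--     land = rev[::-1]
--     answer = 0
--     for i in range(height - 1):
--         for j in range(width):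
--             if grid[i][j] == '$':
--                 grid[i][j] = '.'
--                 answer += 1
--                 k = land[i][j]
--                 if k is not None and k != i:
--                     grid[k][j] = '$'
--     return answer
-- ===== Notes on version B (the rewrite author's own statement) =====
-- stated objective: alternative
-- what changed: B replaces A's string-slicing grid mutation and per-dust linear falling scan by a list-of-lists grid plus a precomputed per-column nearest-shelf-below table, so each falling dust is placed with one table lookup instead of a downward scan and each cell write is a list assignment instead of a string rebuild.
-- outside the precondition, e.g. on solution(['ab', 'a']): A returns 0, B raises IndexError
import Mathlib
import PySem

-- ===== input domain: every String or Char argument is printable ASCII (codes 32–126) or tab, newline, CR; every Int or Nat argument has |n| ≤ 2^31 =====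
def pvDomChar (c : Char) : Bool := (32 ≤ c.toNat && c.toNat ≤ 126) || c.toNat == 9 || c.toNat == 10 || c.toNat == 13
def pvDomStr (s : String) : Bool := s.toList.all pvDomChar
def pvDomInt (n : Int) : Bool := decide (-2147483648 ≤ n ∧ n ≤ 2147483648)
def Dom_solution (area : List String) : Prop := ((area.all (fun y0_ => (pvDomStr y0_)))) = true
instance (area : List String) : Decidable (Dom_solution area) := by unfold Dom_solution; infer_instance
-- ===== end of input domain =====

-- B replaces A's string-slicing simulation by a list-of-lists grid with a precomputed
-- per-column nearest-shelf-below table (the inner falling scan becomes one lookup).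
-- A mutates its argument list in place (B does not); the equivalence proved is about the return value.

-- ===== PORT A =====

-- width = len(area[0])  (shared by both Pythons; IndexError on [] is excluded by Pre_)
def pvW (area : List String) : Nat :=
  match PySem.List.pyGet? area (0 : Int) with
  | some r => r.toList.length  -- len(r) (= PySem.Str.len, as a Nat)
  | none => 0

-- area[i][j]  (none = IndexError)
def pvCellA (area : List String) (i j : Nat) : Option Char :=
  (PySem.List.pyGet? area (i : Int)).bind (fun row => PySem.Str.pyGet? row (j : Int))

-- area[i] = area[i][:j] + c + area[i][j+1:]
def pvWriteA (area : List String) (i j : Nat) (c : Char) : List String :=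
  match PySem.List.pyGet? area (i : Int) with
  | some row => PySem.List.pySetD area (i : Int)
      (PySem.Str.slice row none (some (j : Int)) ++ String.singleton c ++
       PySem.Str.slice row (some ((j : Int) + 1)) none)
  | none => area

-- for k in range(i, height-1): if area[k+1][j] == '#': area[k] = …'$'…; break
def pvFallA (area : List String) (j : Nat) : List Nat → List String
  | [] => area
  | k :: ks =>
    if pvCellA area (k + 1) j = some '#' then pvWriteA area k j '$'
    else pvFallA area j ks

-- inner loop: for j in range(width)
def pvColsA (i height : Nat) : List Nat → List String × Int → List String × Int
  | [], st => st
  | j :: js, (area, ans) =>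
    if pvCellA area i j = some '$' then
      let a1 := pvWriteA area i j '.'
      let a2 := if pvCellA a1 (i + 1) j ≠ some '#'
                then pvFallA a1 j (List.range' i (height - 1 - i)) else a1
      pvColsA i height js (a2, ans + 1)
    else pvColsA i height js (area, ans)

-- outer loop: for i in range(height-1)
def pvRowsA (height width : Nat) : List Nat → List String × Int → List String × Int
  | [], st => st
  | i :: is, st => pvRowsA height width is (pvColsA i height (List.range width) st)

def solution (area : List String) : Int :=
  (pvRowsA area.length (pvW area) (List.range (area.length - 1)) (area, 0)).2

-- ===== PORT B =====

-- grid = [list(row) for row in area]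
def pvGrid (area : List String) : List (List Char) := area.map String.toList

-- grid[i][j]  (none = IndexError)
def pvCellB (g : List (List Char)) (i j : Nat) : Option Char :=
  (g[i]?).bind (fun r => r[j]?)

-- grid[i][j] = c
def pvWriteB (g : List (List Char)) (i j : Nat) (c : Char) : List (List Char) :=
  g.set i ((g.getD i []).set j c)

-- row = [i if grid[i+1][j] == '#' else rev[-1][j] for j in range(width)]
def pvLandRowB (g : List (List Char)) (i width : Nat) (below : List (Option Nat)) : List (Option Nat) :=
  (List.range width).map (fun j => if pvCellB g (i + 1) j = some '#' then some i else below.getD j none)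

-- for i in range(height-2, -1, -1): rev.append(row)
def pvLandRev (g : List (List Char)) (width : Nat) : List Nat → List (List (Option Nat)) → List (List (Option Nat))
  | [], rev => rev
  | i :: is, rev =>
    pvLandRev g width is (rev ++ [pvLandRowB g i width (PySem.List.pyGetD rev (-1) [])])

-- land = rev[::-1]
def pvLand0 (area : List String) : List (List (Option Nat)) :=
  (PySem.List.slice? (pvLandRev (pvGrid area) (pvW area) (List.range (area.length - 1)).reverse
      [List.replicate (pvW area) none]) none none (-1)).getD []

-- inner loop of B
def pvColsB (landRow : List (Option Nat)) (i : Nat) : List Nat → List (List Char) × Int → List (List Char) × Int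
  | [], st => st
  | j :: js, (g, ans) =>
    if pvCellB g i j = some '$' then
      let g1 := pvWriteB g i j '.'
      let g2 := match landRow.getD j none with
                | some k => if k ≠ i then pvWriteB g1 k j '$' else g1
                | none => g1
      pvColsB landRow i js (g2, ans + 1)
    else pvColsB landRow i js (g, ans)

-- outer loop of B
def pvRowsB (land : List (List (Option Nat))) (width : Nat) : List Nat → List (List Char) × Int → List (List Char) × Int
  | [], st => st
  | i :: is, st => pvRowsB land width is (pvColsB (land.getD i []) i (List.range width) st)

def solution_alt (area : List String) : Int :=
  (pvRowsB (pvLand0 area) (pvW area) (List.range (area.length - 1)) (pvGrid area, 0)).2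

-- ===== PRECONDITION & SPEC =====
-- Pre_ excludes the empty list (A raises IndexError at len(area[0])) and ragged grids whose
-- rows are shorter than the first row: there A raises IndexError as soon as it indexes past a
-- short row (on a few such grids A happens to return because the short cells are never reached,
-- but B's land-table precomputation touches every column and raises).
def Pre_solution (area : List String) : Prop :=
  area ≠ [] ∧ ∀ s ∈ area, (area.headD "").toList.length ≤ s.toList.length
instance (area : List String) : Decidable (Pre_solution area) := by unfold Pre_solution; infer_instance

def pvWitness_solution : List String := ["$.", ".#"]

def Spec_solution (area : List String) (out : Int) : Prop := out = solution_alt area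
instance (area : List String) (out : Int) : Decidable (Spec_solution area out) := by unfold Spec_solution; infer_instance

-- ===== CLAIM (what is proved, stated in full; the proofs are below) =====
def Claim_equal_solution : Prop := ∀ (area : List String), Dom_solution area → Pre_solution area → Spec_solution area (solution area)

-- ===== LEMMAS AND PROOFS =====

-- proof-side cons-accumulator form of the land-table loop (pvLandRev builds it appended-then-reversed)
def pvLandB (g : List (List Char)) (width : Nat) : List Nat → List (List (Option Nat)) → List (List (Option Nat))
  | [], land => land
  | i :: is, land => pvLandB g width is (pvLandRowB g i width (land.getD 0 []) :: land)

theorem pvLandRev_reverse (g : List (List Char)) (w : Nat) :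
    ∀ (is : List Nat) (rev : List (List (Option Nat))), rev ≠ [] →
      (pvLandRev g w is rev).reverse = pvLandB g w is rev.reverse := by
  intro is
  induction is with
  | nil => intro rev _; rfl
  | cons i is ih =>
    intro rev hrev
    show (pvLandRev g w is (rev ++ [pvLandRowB g i w (PySem.List.pyGetD rev (-1) [])])).reverse = _
    rw [ih _ (by simp)]
    show _ = pvLandB g w is (pvLandRowB g i w (rev.reverse.getD 0 []) :: rev.reverse)
    congr 1
    rw [List.reverse_append]
    simp only [List.reverse_cons, List.reverse_nil, List.nil_append, List.singleton_append]
    congr 2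
    rw [PySem.List.pyGetD_neg_one rev [] hrev]
    rw [List.getD, List.getElem?_reverse (by simp [List.length_pos_iff.mpr hrev])]
    simp only [List.getLast_eq_getElem]
    rw [List.getElem?_eq_getElem (by simp [Nat.sub_lt (List.length_pos_iff.mpr hrev)])]
    simp

theorem pvLand0_eq (area : List String) :
    pvLand0 area = pvLandB (pvGrid area) (pvW area) (List.range (area.length - 1)).reverse
      [List.replicate (pvW area) none] := by
  unfold pvLand0
  rw [PySem.List.slice?_none_none_neg_one]
  simp only [Option.getD_some]
  rw [pvLandRev_reverse _ _ _ _ (by simp)]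
  rfl

-- invariants of the simulation
def pvShape (g : List (List Char)) (h w : Nat) : Prop :=
  g.length = h ∧ ∀ r ∈ g, w ≤ r.length

def pvHashEq (g O : List (List Char)) (w : Nat) : Prop :=
  ∀ r c, c < w → (pvCellB g r c = some '#' ↔ pvCellB O r c = some '#')

-- land-table entry for (i, j)
def pvE (area : List String) (i j : Nat) : Option Nat :=
  ((pvLand0 area).getD i []).getD j none

-- A-side reads/writes are B-side reads/writes through String.toList
theorem pvCellA_eq (area : List String) (i j : Nat) :
    pvCellA area i j = pvCellB (area.map String.toList) i j := by
  simp only [pvCellA, pvCellB, PySem.List.pyGet?_natCast, List.getElem?_map]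
  cases area[i]? <;> simp

theorem pvWriteA_eq (area : List String) (i j : Nat) (c : Char) (row : String)
    (hrow : area[i]? = some row) (hj : j < row.toList.length) :
    (pvWriteA area i j c).map String.toList = pvWriteB (area.map String.toList) i j c := by
  unfold pvWriteA pvWriteB
  rw [PySem.List.pyGet?_natCast, hrow]
  simp only [PySem.List.pySetD_natCast, List.map_set]
  have hg : (area.map String.toList).getD i [] = row.toList := by
    simp [List.getD, List.getElem?_map, hrow]
  rw [hg]
  congr 1
  have h1 : (PySem.Str.slice row none (some (j : Int))).toList = row.toList.take j := by
    simp [PySem.Str.toList_slice, PySem.List.slice_to_natCast]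
  have h2 : (PySem.Str.slice row (some ((j : Int) + 1)) none).toList = row.toList.drop (j + 1) := by
    have := PySem.List.slice_from_natCast (xs := row.toList) (a := j + 1)
    simp only [PySem.Str.toList_slice]
    simpa using this
  rw [List.set_eq_take_cons_drop c hj]
  simp [String.toList_append, h1, h2]

theorem pvWriteA_length (area : List String) (i j : Nat) (c : Char) :
    (pvWriteA area i j c).length = area.length := by
  unfold pvWriteA
  cases h : PySem.List.pyGet? area (i : Int) <;> simp

-- pvWriteB facts
theorem pvCellB_writeB_ne (g : List (List Char)) (i j r s : Nat) (c : Char)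
    (h : r ≠ i ∨ s ≠ j) :
    pvCellB (pvWriteB g i j c) r s = pvCellB g r s := by
  unfold pvCellB pvWriteB
  rcases h with h | h
  · rw [List.getElem?_set_ne (Ne.symm h)]
  · by_cases hr : r = i
    · subst hr
      by_cases hi : r < g.length
      · rw [List.getElem?_set_self hi, List.getElem?_eq_getElem hi]
        have : g.getD r [] = g[r] := by simp [List.getD, List.getElem?_eq_getElem hi]
        rw [this]
        simp [List.getElem?_set_ne (Ne.symm h)]
      · rw [List.set_eq_of_length_le (Nat.le_of_not_lt hi)]
    · rw [List.getElem?_set_ne (Ne.symm hr)]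

theorem pvCellB_writeB_self (g : List (List Char)) (i j : Nat) (c : Char)
    (hi : i < g.length) (hj : j < (g.getD i []).length) :
    pvCellB (pvWriteB g i j c) i j = some c := by
  unfold pvCellB pvWriteB
  rw [List.getElem?_set_self hi]
  simp only [Option.bind_some, List.getElem?_set_self hj]

theorem pvShape_writeB (g : List (List Char)) (i j : Nat) (c : Char) (h w : Nat)
    (hs : pvShape g h w) : pvShape (pvWriteB g i j c) h w := by
  obtain ⟨hl, hr⟩ := hs
  by_cases hi : i < g.length
  · constructor
    · simpa [pvWriteB] using hl
    · intro r hrmem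
      rcases List.mem_or_eq_of_mem_set hrmem with hm | hm
      · exact hr r hm
      · subst hm
        rw [List.length_set]
        refine hr _ ?_
        rw [List.getD_eq_getElem _ _ hi]
        exact List.getElem_mem hi
  · unfold pvWriteB
    rw [List.set_eq_of_length_le (Nat.le_of_not_lt hi)]
    exact ⟨hl, hr⟩

theorem pvHashEq_writeB (g O : List (List Char)) (i j : Nat) (c : Char) (w : Nat)
    (hi : i < g.length) (hj : j < (g.getD i []).length) (hjw : j < w)
    (hne : pvCellB g i j ≠ some '#') (hc : c ≠ '#')
    (he : pvHashEq g O w) : pvHashEq (pvWriteB g i j c) O w := by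
  intro r s hs
  by_cases hij : r = i ∧ s = j
  · obtain ⟨hri, hsj⟩ := hij
    subst hri; subst hsj
    rw [pvCellB_writeB_self g r s c hi hj]
    constructor
    · intro hcc
      exact absurd (Option.some.inj hcc) hc
    · intro hO
      exact absurd ((he r s hs).mpr hO) hne
  · rw [pvCellB_writeB_ne g i j r s c (by tauto)]
    exact he r s hs

-- characterization of the land table built by pvLandB
theorem pvLandB_getD (g : List (List Char)) (w : Nat) :
    ∀ (n : Nat) (acc : List (List (Option Nat))),
      (∀ p, (pvLandB g w (List.range n).reverse acc).getD (n + p) [] = acc.getD p []) ∧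
      (∀ i, i < n → (pvLandB g w (List.range n).reverse acc).getD i [] =
        pvLandRowB g i w ((pvLandB g w (List.range n).reverse acc).getD (i + 1) [])) := by
  intro n
  induction n with
  | zero =>
    intro acc
    refine ⟨fun p => by simp [pvLandB], fun i hi => absurd hi (by omega)⟩
  | succ n ih =>
    intro acc
    have hr : (List.range (n + 1)).reverse = n :: (List.range n).reverse := by
      rw [List.range_succ]; simp
    have hstep : pvLandB g w (List.range (n + 1)).reverse acc =
        pvLandB g w (List.range n).reverse (pvLandRowB g n w (acc.getD 0 []) :: acc) := by
      rw [hr]; rfl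
    obtain ⟨ih1, ih2⟩ := ih (pvLandRowB g n w (acc.getD 0 []) :: acc)
    constructor
    · intro p
      rw [hstep]
      have hnp : n + 1 + p = n + (p + 1) := by omega
      rw [hnp, ih1 (p + 1), List.getD_cons_succ]
    · intro i hi
      rw [hstep]
      rcases Nat.lt_or_ge i n with hin | hin
      · exact ih2 i hin
      · have hieq : i = n := by omega
        subst hieq
        have e1 : (pvLandB g w (List.range i).reverse (pvLandRowB g i w (acc.getD 0 []) :: acc)).getD i [] = pvLandRowB g i w (acc.getD 0 []) := by
          have := ih1 0
          simpa using this
        have e2 : (pvLandB g w (List.range i).reverse (pvLandRowB g i w (acc.getD 0 []) :: acc)).getD (i + 1) [] = acc.getD 0 [] := by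
          have := ih1 1
          simpa using this
        rw [e1, e2]

theorem pvE_rec (area : List String) (i j : Nat)
    (hi : i < area.length - 1) (hj : j < pvW area) :
    pvE area i j = if pvCellB (pvGrid area) (i + 1) j = some '#' then some i
                   else pvE area (i + 1) j := by
  unfold pvE
  rw [pvLand0_eq]
  rw [(pvLandB_getD (pvGrid area) (pvW area) (area.length - 1)
        [List.replicate (pvW area) none]).2 i hi]
  unfold pvLandRowB
  rw [PySem.List.getD_map_range _ _ _ _ hj]

theorem pvE_last (area : List String) (j : Nat) :
    pvE area (area.length - 1) j = none := by
  unfold pvE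
  rw [pvLand0_eq]
  have h1 := (pvLandB_getD (pvGrid area) (pvW area) (area.length - 1)
        [List.replicate (pvW area) none]).1 0
  simp only [Nat.add_zero] at h1
  rw [h1]
  simp [List.getD]

-- any landing row k returned by the table lies in [i, h-1) and, unless k = i, is not a shelf
theorem pvE_some_spec (area : List String) :
    ∀ (d i j k : Nat), i + d = area.length - 1 → j < pvW area →
      pvE area i j = some k →
      i ≤ k ∧ k < area.length - 1 ∧ (k = i ∨ pvCellB (pvGrid area) k j ≠ some '#') := by
  intro d
  induction d with
  | zero =>
    intro i j k hd hj hE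
    rw [Nat.add_zero] at hd
    subst hd
    rw [pvE_last] at hE
    exact absurd hE (by simp)
  | succ d ih =>
    intro i j k hd hj hE
    have hi : i < area.length - 1 := by omega
    rw [pvE_rec area i j hi hj] at hE
    by_cases hsh : pvCellB (pvGrid area) (i + 1) j = some '#'
    · rw [if_pos hsh] at hE
      have hk : k = i := (Option.some.inj hE).symm
      exact ⟨by omega, by omega, Or.inl hk⟩
    · rw [if_neg hsh] at hE
      obtain ⟨h1, h2, h3⟩ := ih (i + 1) j k (by omega) hj hE
      refine ⟨by omega, h2, Or.inr ?_⟩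
      rcases h3 with h3 | h3
      · rw [h3]; exact hsh
      · exact h3

-- A's falling scan computes exactly the land-table lookup
theorem pvFallA_spec (area0 : List String) (j : Nat) (hj : j < pvW area0) :
    ∀ (d i : Nat) (area : List String), i + d = area0.length - 1 →
      area.length = area0.length →
      pvHashEq (area.map String.toList) (pvGrid area0) (pvW area0) →
      pvFallA area j (List.range' i d) =
        (match pvE area0 i j with
         | some k => pvWriteA area k j '$'
         | none => area) := by
  intro d
  induction d with
  | zero =>
    intro i area hd _ _
    rw [Nat.add_zero] at hd
    subst hd
    rw [pvE_last]
    rfl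
  | succ d ih =>
    intro i area hd hlen he
    have hi : i < area0.length - 1 := by omega
    rw [List.range'_succ]
    show (if pvCellA area (i + 1) j = some '#' then pvWriteA area i j '$'
          else pvFallA area j (List.range' (i + 1) d)) = _
    rw [pvCellA_eq area (i + 1) j]
    rw [pvE_rec area0 i j hi hj]
    by_cases hsh : pvCellB (pvGrid area0) (i + 1) j = some '#'
    · rw [if_pos ((he (i + 1) j hj).mpr hsh), if_pos hsh]
    · rw [if_neg (fun hcc => hsh ((he (i + 1) j hj).mp hcc)), if_neg hsh]
      exact ih (i + 1) area (by omega) hlen he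

-- lockstep for the inner loop
theorem pvColsA_eq (area0 : List String) (i : Nat) (hi : i < area0.length - 1) :
    ∀ (js : List Nat) (area : List String) (ans : Int),
      (∀ j ∈ js, j < pvW area0) →
      pvShape (area.map String.toList) area0.length (pvW area0) →
      pvHashEq (area.map String.toList) (pvGrid area0) (pvW area0) →
      ((pvColsA i area0.length js (area, ans)).1.map String.toList,
        (pvColsA i area0.length js (area, ans)).2) =
        pvColsB ((pvLand0 area0).getD i []) i js (area.map String.toList, ans) ∧
      pvShape ((pvColsA i area0.length js (area, ans)).1.map String.toList) area0.length (pvW area0) ∧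
      pvHashEq ((pvColsA i area0.length js (area, ans)).1.map String.toList) (pvGrid area0) (pvW area0) := by
  intro js
  induction js with
  | nil =>
    intro area ans _ hsh hhe
    exact ⟨rfl, hsh, hhe⟩
  | cons j js ih =>
    intro area ans hjs hsh hhe
    have hjw : j < pvW area0 := hjs j List.mem_cons_self
    have hjs' : ∀ j' ∈ js, j' < pvW area0 := fun j' hj' => hjs j' (List.mem_cons_of_mem _ hj')
    have hlen : area.length = area0.length := by simpa using hsh.1
    have hiw : i < area.length := by omega
    have hrow : area[i]? = some area[i] := List.getElem?_eq_getElem hiw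
    have hmemrow : area[i].toList ∈ area.map String.toList :=
      List.mem_map_of_mem (List.getElem_mem hiw)
    have hjrow : j < area[i].toList.length := Nat.lt_of_lt_of_le hjw (hsh.2 _ hmemrow)
    have hgetD : (area.map String.toList).getD i [] = area[i].toList := by
      simp [List.getD, List.getElem?_map, hrow]
    simp only [pvColsA, pvColsB, pvCellA_eq area i j]
    by_cases hcell : pvCellB (area.map String.toList) i j = some '$'
    · rw [if_pos hcell, if_pos hcell]
      have hm1 : (pvWriteA area i j '.').map String.toList =
          pvWriteB (area.map String.toList) i j '.' := pvWriteA_eq area i j '.' area[i] hrow hjrow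
      have hsh1 : pvShape (pvWriteB (area.map String.toList) i j '.') area0.length (pvW area0) :=
        pvShape_writeB _ i j '.' _ _ hsh
      have hhe1 : pvHashEq (pvWriteB (area.map String.toList) i j '.') (pvGrid area0) (pvW area0) :=
        pvHashEq_writeB _ _ i j '.' _ (by rw [hsh.1]; omega) (by rw [hgetD]; exact hjrow) hjw
          (by rw [hcell]; simp) (by decide) hhe
      have hlen1 : (pvWriteA area i j '.').length = area0.length := by
        rw [pvWriteA_length]; exact hlen
      have hcellg1 : pvCellA (pvWriteA area i j '.') (i + 1) j =
          pvCellB (pvWriteB (area.map String.toList) i j '.') (i + 1) j := by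
        rw [pvCellA_eq, hm1]
      have hscrut : ((pvLand0 area0).getD i []).getD j none = pvE area0 i j := rfl
      rw [hscrut, pvE_rec area0 i j hi hjw]
      by_cases hshp : pvCellB (pvGrid area0) (i + 1) j = some '#'
      · rw [if_pos hshp]
        have hg1 : pvCellB (pvWriteB (area.map String.toList) i j '.') (i + 1) j = some '#' :=
          (hhe1 (i + 1) j hjw).mpr hshp
        rw [if_neg (by rw [hcellg1]; simpa using hg1)]
        simp only [ne_eq, not_true_eq_false, if_false]
        have := ih (pvWriteA area i j '.') (ans + 1) hjs' (by rw [hm1]; exact hsh1) (by rw [hm1]; exact hhe1)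
        rw [hm1] at this
        exact this
      · rw [if_neg hshp]
        have hguard : pvCellA (pvWriteA area i j '.') (i + 1) j ≠ some '#' := by
          rw [hcellg1]
          intro hc
          exact hshp ((hhe1 (i + 1) j hjw).mp hc)
        rw [if_pos hguard]
        have hfall := pvFallA_spec area0 j hjw (area0.length - 1 - i) i (pvWriteA area i j '.')
          (by omega) hlen1 (by rw [hm1]; exact hhe1)
        rw [pvE_rec area0 i j hi hjw, if_neg hshp] at hfall
        cases hE : pvE area0 (i + 1) j with
        | none =>
          rw [hE] at hfall
          rw [hfall]
          have := ih (pvWriteA area i j '.') (ans + 1) hjs' (by rw [hm1]; exact hsh1) (by rw [hm1]; exact hhe1)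
          rw [hm1] at this
          exact this
        | some k =>
          rw [hE] at hfall
          obtain ⟨hk1, hk2, hk3⟩ := pvE_some_spec area0 (area0.length - 1 - (i + 1)) (i + 1) j k
            (by omega) hjw hE
          have hkne : k ≠ i := by omega
          have hfall' : pvFallA (pvWriteA area i j '.') j (List.range' i (area0.length - 1 - i)) =
              pvWriteA (pvWriteA area i j '.') k j '$' := hfall
          have hBmatch : (match (some k : Option Nat) with
              | some k => if k ≠ i then pvWriteB (pvWriteB (List.map String.toList area) i j '.') k j '$'
                          else pvWriteB (List.map String.toList area) i j '.'
              | none => pvWriteB (List.map String.toList area) i j '.')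
              = pvWriteB (pvWriteB (List.map String.toList area) i j '.') k j '$' := by
            simp [hkne]
          rw [hfall', hBmatch]
          have hka : k < (pvWriteA area i j '.').length := by omega
          have hrow1 : (pvWriteA area i j '.')[k]? = some (pvWriteA area i j '.')[k] :=
            List.getElem?_eq_getElem hka
          have hmem1 : (pvWriteA area i j '.')[k].toList ∈ (pvWriteA area i j '.').map String.toList :=
            List.mem_map_of_mem (List.getElem_mem hka)
          have hjrow1 : j < (pvWriteA area i j '.')[k].toList.length := by
            refine Nat.lt_of_lt_of_le hjw (hsh1.2 _ ?_)
            rw [← hm1]; exact hmem1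
          have hm2 : (pvWriteA (pvWriteA area i j '.') k j '$').map String.toList =
              pvWriteB (pvWriteB (area.map String.toList) i j '.') k j '$' := by
            rw [← hm1]
            exact pvWriteA_eq _ k j '$' _ hrow1 hjrow1
          have hcellOk : pvCellB (pvGrid area0) k j ≠ some '#' := by
            rcases hk3 with hk3 | hk3
            · rw [hk3]; exact hshp
            · exact hk3
          have hne1 : pvCellB (pvWriteB (area.map String.toList) i j '.') k j ≠ some '#' :=
            fun hc => hcellOk ((hhe1 k j hjw).mp hc)
          have hgetD1 : (pvWriteB (area.map String.toList) i j '.').getD k [] =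
              (pvWriteA area i j '.')[k].toList := by
            rw [← hm1]
            simp [List.getD, List.getElem?_map, hrow1]
          have hsh2 := pvShape_writeB (pvWriteB (area.map String.toList) i j '.') k j '$' _ _ hsh1
          have hhe2 := pvHashEq_writeB (pvWriteB (area.map String.toList) i j '.') (pvGrid area0)
            k j '$' (pvW area0) (by rw [hsh1.1]; omega) (by rw [hgetD1]; exact hjrow1) hjw hne1
            (by decide) hhe1
          have := ih (pvWriteA (pvWriteA area i j '.') k j '$') (ans + 1) hjs'
            (by rw [hm2]; exact hsh2) (by rw [hm2]; exact hhe2)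
          rw [hm2] at this
          exact this
    · rw [if_neg hcell, if_neg hcell]
      exact ih area ans hjs' hsh hhe

-- lockstep for the outer loop
theorem pvRowsA_eq (area0 : List String) :
    ∀ (is : List Nat) (area : List String) (ans : Int),
      (∀ i ∈ is, i < area0.length - 1) →
      pvShape (area.map String.toList) area0.length (pvW area0) →
      pvHashEq (area.map String.toList) (pvGrid area0) (pvW area0) →
      (pvRowsA area0.length (pvW area0) is (area, ans)).2 =
        (pvRowsB (pvLand0 area0) (pvW area0) is (area.map String.toList, ans)).2 := by
  intro is
  induction is with
  | nil =>
    intro area ans _ _ _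
    rfl
  | cons i is ih =>
    intro area ans his hsh hhe
    have hi : i < area0.length - 1 := his i List.mem_cons_self
    have his' : ∀ i' ∈ is, i' < area0.length - 1 := fun i' h => his i' (List.mem_cons_of_mem _ h)
    obtain ⟨hpair, hsh', hhe'⟩ := pvColsA_eq area0 i hi (List.range (pvW area0)) area ans
      (fun j hj => List.mem_range.mp hj) hsh hhe
    simp only [pvRowsA, pvRowsB]
    rw [← hpair]
    have := ih (pvColsA i area0.length (List.range (pvW area0)) (area, ans)).1
      (pvColsA i area0.length (List.range (pvW area0)) (area, ans)).2 his' hsh' hhe'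
    simpa using this

-- ===== VERDICT (by name: the statement is the Claim_ definition above) =====
theorem solution_spec : Claim_equal_solution := by
  intro area _ hpre
  obtain ⟨hne, hall⟩ := hpre
  unfold Spec_solution solution solution_alt
  refine pvRowsA_eq area (List.range (area.length - 1)) area 0
    (fun i hi => List.mem_range.mp hi) ⟨by simp, ?_⟩ (fun r c _ => Iff.rfl)
  intro r hr
  obtain ⟨s, hs, hrs⟩ := List.mem_map.mp hr
  subst hrs
  have hw : pvW area = (area.headD "").toList.length := by
    cases area with
    | nil => exact absurd rfl hne
    | cons a rest =>
      unfold pvW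
      rw [PySem.List.pyGet?_zero_cons]
      rfl
  rw [hw]
  exact hall s hs
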